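-- pv_equiv track=rewrite | github.com/vikrampuliyadi/csi_parser | backend/app/utils/text.py | normalize_text_with_mapping
-- ===== SOURCE A (Python) =====
-- import unicodedata
-- from typing import List, Tuple
--
-- def normalize_text_with_mapping(s: str) -> Tuple[str, List[int], str]:
--     """Return a whitespace-collapsed string and a map back to the source text.
--
--     ``normalize_text`` has historically returned a version of ``s`` that is
--     safe for keyword matching (Windows newlines collapsed, runs of whitespace
--     reduced to single spaces, leading/trailing spaces trimmed).  For CSI section
--     resolution we also need to know *where* in the original page each character
--     of the normalized string originated.  This helper performs the same
--     canonicalisation work but additionally yields ``index_map`` and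
--     ``canonical_source``:
--
--     ``index_map``
--         A list where ``index_map[i]`` is the index in ``canonical_source`` that
--         produced ``normalized_text[i]``.
--
--     ``canonical_source``
--         The intermediate form of ``s`` after unicode normalization and newline
--         canonicalisation but before whitespace collapsing.  This lets the caller
--         correlate resolved indices with the exact page text if needed.
--     """
--
--     canonical = unicodedata.normalize('NFKC', s).replace('\r', '\n')
--     result_chars: List[str] = []
--     index_map: List[int] = []
--     last_was_space = False
--
--     for idx, ch in enumerate(canonical):
--         if ch.isspace():
--             if not result_chars:
--                 continue
--             if last_was_space:
--                 continue
--             result_chars.append(' ')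
--             index_map.append(idx)
--             last_was_space = True
--         else:
--             result_chars.append(ch)
--             index_map.append(idx)
--             last_was_space = False
--
--     # Strip trailing space to mirror ``normalize_text`` behaviour.
--     if result_chars and result_chars[-1] == ' ':
--         result_chars.pop()
--         index_map.pop()
--
--     normalized = ''.join(result_chars)
--     return normalized, index_map, canonical
-- ===== SOURCE B (Python) =====
-- import unicodedata
-- from typing import List, Tuple
--
-- def normalize_text_with_mapping(s: str) -> Tuple[str, List[int], str]:
--     """Token-based rewrite: collect the maximal non-whitespace runs with their
--     start indices in one scan, then join them with single spaces; each
--     separating space maps to the index just past the previous token (the first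
--     whitespace of the separating run), so no trailing-space pop is needed."""
--     canonical = unicodedata.normalize('NFKC', s).replace('\r', '\n')
--     n = len(canonical)
--     tokens: List[Tuple[int, str]] = []
--     i = 0
--     while i < n:
--         if canonical[i].isspace():
--             i += 1
--         else:
--             j = i
--             while j < n and not canonical[j].isspace():
--                 j += 1
--             tokens.append((i, canonical[i:j]))
--             i = j
--     index_map: List[int] = []
--     for k, (start, tok) in enumerate(tokens):
--         if k > 0:
--             prev_start, prev_tok = tokens[k - 1]
--             index_map.append(prev_start + len(prev_tok))
--         index_map.extend(range(start, start + len(tok)))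
--     return ' '.join(tok for _, tok in tokens), index_map, canonical
-- ===== Notes on version B (the rewrite author's own statement) =====
-- stated objective: alternative
-- what changed: A's single character-by-character pass with a last_was_space flag and a trailing-space pop is replaced by a token scan: collect the maximal non-whitespace runs with their start indices, then join them with single spaces, mapping each separator to the end index of the previous token, so no flag and no trailing pop are needed.
import Mathlib
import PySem

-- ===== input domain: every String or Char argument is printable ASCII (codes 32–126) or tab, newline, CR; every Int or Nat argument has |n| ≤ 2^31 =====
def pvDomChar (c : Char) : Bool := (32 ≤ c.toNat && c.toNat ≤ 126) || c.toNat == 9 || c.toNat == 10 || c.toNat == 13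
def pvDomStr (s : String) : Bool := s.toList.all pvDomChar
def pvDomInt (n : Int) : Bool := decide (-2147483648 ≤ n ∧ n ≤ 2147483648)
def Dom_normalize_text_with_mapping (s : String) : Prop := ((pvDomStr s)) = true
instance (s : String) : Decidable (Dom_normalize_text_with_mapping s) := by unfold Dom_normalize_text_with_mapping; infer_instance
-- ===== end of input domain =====

-- B rewrites A's flag-driven single pass as a token scan: collect the maximal non-whitespace
-- runs with their start indices, then join them with single spaces (each separator mapped to
-- the end index of the previous token), so no trailing-space pop is needed. Objective: alternative.

-- ===== PORT A =====
-- unicodedata.normalize('NFKC', ·) is the identity on the printable-ASCII/tab/newline/CR domain: ported as the identity (exact on that domain)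
-- the 'for idx, ch in enumerate(canonical)' loop, carrying (result_chars, index_map, last_was_space)
def aLoop : Nat → List Char → List Char → List Int → Bool → List Char × List Int
  | _, [], rc, im, _ => (rc, im)
  | idx, ch :: rest, rc, im, lastWasSpace =>
    if PySem.Chars.isspace ch then
      if rc.isEmpty then aLoop (idx + 1) rest rc im lastWasSpace
      else if lastWasSpace then aLoop (idx + 1) rest rc im lastWasSpace
      else aLoop (idx + 1) rest (rc ++ [' ']) (im ++ [(idx : Int)]) true
    else aLoop (idx + 1) rest (rc ++ [ch]) (im ++ [(idx : Int)]) false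

def normalize_text_with_mapping (s : String) : String × List Int × String :=
  let canonical := PySem.Chars.replace s.toList ['\r'] ['\n']
  let (rc, im) := aLoop 0 canonical [] [] false
  -- if result_chars and result_chars[-1] == ' ': pop both
  let (rc, im) := if rc.getLast? = some ' ' then (rc.dropLast, im.dropLast) else (rc, im)
  (String.ofList rc, im, String.ofList canonical)

-- ===== PORT B =====
-- the outer 'while i < n' scan of Source B: skip a whitespace char, or take the maximal
-- non-whitespace run starting at i as a token (start index, characters)
def bTokenize (i : Nat) (cs : List Char) : List (Nat × List Char) :=
  match cs with
  | [] => []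
  | c :: rest =>
    if PySem.Chars.isspace c then bTokenize (i + 1) rest
    else
      let tok := c :: rest.takeWhile (fun d => !PySem.Chars.isspace d)
      (i, tok) :: bTokenize (i + tok.length) (rest.dropWhile (fun d => !PySem.Chars.isspace d))
termination_by cs.length
decreasing_by
  · simp
  · have := List.length_dropWhile_le (fun d => !PySem.Chars.isspace d) rest
    simp; omega

-- the 'k > 0' part of Source B's index_map loop: separator index (= end of previous token,
-- pend) before each token, then the token's own range(start, start + len(tok))
def bSepIdx (pend : Nat) : List (Nat × List Char) → List Int
  | [] => []
  | (st, t) :: ts => (pend : Int) :: (PySem.List.pyRange st (st + t.length) 1 ++ bSepIdx (st + t.length) ts)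

-- Source B's index_map loop: first token has no separator, the rest go through bSepIdx
def bIndexMap : List (Nat × List Char) → List Int
  | [] => []
  | (st, t) :: ts => PySem.List.pyRange st (st + t.length) 1 ++ bSepIdx (st + t.length) ts

def normalize_text_with_mapping_alt (s : String) : String × List Int × String :=
  -- unicodedata.normalize('NFKC', ·) ported as the identity (exact on the ASCII domain)
  let canonical := PySem.Chars.replace s.toList ['\r'] ['\n']
  let ts := bTokenize 0 canonical
  (String.ofList (PySem.Chars.join [' '] (ts.map Prod.snd)), bIndexMap ts, String.ofList canonical)

-- ===== PRECONDITION & SPEC =====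
def Spec_normalize_text_with_mapping (s : String) (out : String × List Int × String) : Prop := out = normalize_text_with_mapping_alt s
instance (s : String) (out : String × List Int × String) : Decidable (Spec_normalize_text_with_mapping s out) := by unfold Spec_normalize_text_with_mapping; infer_instance

-- ===== CLAIM (what is proved, stated in full; the proofs are below) =====
def Claim_equal_normalize_text_with_mapping : Prop := ∀ (s : String), Dom_normalize_text_with_mapping s → Spec_normalize_text_with_mapping s (normalize_text_with_mapping s)

-- ===== LEMMAS AND PROOFS =====

-- the characters a list of tokens contributes after the first token: ' ' before each token
def restChars : List (Nat × List Char) → List Char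
  | [] => []
  | (_, t) :: ts => ' ' :: (t ++ restChars ts)

-- end index of the last token (pend if there is none)
def lastEnd (pend : Nat) : List (Nat × List Char) → Nat
  | [] => pend
  | (st, t) :: ts => lastEnd (st + t.length) ts

-- the trailing (chars, indices) A's loop appends past the last token
def trailPair (pend : Nat) (cs : List Char) (ts : List (Nat × List Char)) : List Char × List Int :=
  match cs.getLast? with
  | some c => if PySem.Chars.isspace c then ([' '], [(lastEnd pend ts : Int)]) else ([], [])
  | none => ([], [])

lemma skipTrue (ws : List Char) (hws : ∀ c ∈ ws, PySem.Chars.isspace c = true) :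
    ∀ (rest : List Char) (i : Nat) (rc : List Char) (im : List Int),
      aLoop i (ws ++ rest) rc im true = aLoop (i + ws.length) rest rc im true := by
  intro rest i rc im
  induction ws generalizing i with
  | nil => simp
  | cons c ws ih =>
    have hc := hws c (by simp)
    simp only [List.cons_append, aLoop, hc]
    by_cases h : rc.isEmpty
    · simp only [h, if_true]
      rw [ih (fun c hc => hws c (by simp [hc])) (i+1)]
      simp; ring_nf
    · simp only [h]
      rw [ih (fun c hc => hws c (by simp [hc])) (i+1)]
      simp; ring_nf

lemma skipEmpty (ws : List Char) (hws : ∀ c ∈ ws, PySem.Chars.isspace c = true) :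
    ∀ (rest : List Char) (i : Nat) (flag : Bool),
      aLoop i (ws ++ rest) [] [] flag = aLoop (i + ws.length) rest [] [] flag := by
  intro rest i flag
  induction ws generalizing i with
  | nil => simp
  | cons c ws ih =>
    have hc := hws c (by simp)
    simp only [List.cons_append, aLoop, hc, if_true, List.isEmpty_nil]
    rw [ih (fun c hc => hws c (by simp [hc])) (i+1)]
    simp; ring_nf

lemma runLemma (tok : List Char) (hne : tok ≠ []) (htok : ∀ c ∈ tok, PySem.Chars.isspace c = false) :
    ∀ (rest : List Char) (i : Nat) (rc : List Char) (im : List Int) (flag : Bool),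
      aLoop i (tok ++ rest) rc im flag =
        aLoop (i + tok.length) rest (rc ++ tok)
          (im ++ PySem.List.pyRange (i : Int) ((i : Int) + tok.length) 1) false := by
  intro rest i rc im flag
  induction tok generalizing i rc im flag with
  | nil => exact absurd rfl hne
  | cons c tok ih =>
    have hc := htok c (by simp)
    simp only [List.cons_append, aLoop, hc, Bool.false_eq_true, if_false]
    have hrange : PySem.List.pyRange (i : Int) ((i : Int) + (c :: tok).length) 1 =
        (i : Int) :: PySem.List.pyRange ((i : Int) + 1) ((i : Int) + (c :: tok).length) 1 := by
      apply PySem.List.pyRange_one_cons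
      push_cast [List.length_cons]; omega
    rcases tok with _ | ⟨d, tok⟩
    · rw [hrange]; simp
    · rw [ih (by simp) (fun c hc => htok c (by simp [hc])) (i+1)]
      rw [hrange]
      have e1 : i + 1 + (d :: tok).length = i + (c :: d :: tok).length := by
        simp [List.length_cons]; omega
      have e2 : (((i + 1 : Nat)) : Int) = (i : Int) + 1 := by push_cast; ring
      have e3 : (i : Int) + 1 + ((d :: tok).length : Int)
          = (i : Int) + ((c :: d :: tok).length : Int) := by
        push_cast [List.length_cons]; ring
      rw [e1, e2, e3]
      simp

lemma tokSkip (ws : List Char) (hws : ∀ c ∈ ws, PySem.Chars.isspace c = true) :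
    ∀ (rest : List Char) (i : Nat), bTokenize i (ws ++ rest) = bTokenize (i + ws.length) rest := by
  intro rest i
  induction ws generalizing i with
  | nil => simp
  | cons c ws ih =>
    have hc := hws c (by simp)
    rw [List.cons_append, bTokenize]
    simp only [hc, if_true]
    rw [ih (fun c hc => hws c (by simp [hc])) (i+1)]
    congr 1; simp; ring_nf

lemma tokRun (tok : List Char) (hne : tok ≠ []) (htok : ∀ c ∈ tok, PySem.Chars.isspace c = false)
    (rest : List Char) (hrest : ∀ c, rest.head? = some c → PySem.Chars.isspace c = true) (i : Nat) :
    bTokenize i (tok ++ rest) = (i, tok) :: bTokenize (i + tok.length) rest := by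
  rcases tok with _ | ⟨c, tok⟩
  · exact absurd rfl hne
  · have hc := htok c (by simp)
    rw [List.cons_append, bTokenize]
    simp only [hc, Bool.false_eq_true, if_false]
    have htk : (tok ++ rest).takeWhile (fun d => !PySem.Chars.isspace d) = tok := by
      rw [List.takeWhile_append_of_pos (by intro d hd; simp [htok d (by simp [hd])])]
      rcases rest with _ | ⟨r, rest⟩
      · simp
      · simp [List.takeWhile, hrest r rfl]
    have hdr : (tok ++ rest).dropWhile (fun d => !PySem.Chars.isspace d) = rest := by
      rw [List.dropWhile_append_of_pos (by intro d hd; simp [htok d (by simp [hd])])]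
      rcases rest with _ | ⟨r, rest⟩
      · simp
      · simp [List.dropWhile, hrest r rfl]
    rw [htk, hdr]

lemma bTokenize_wf : ∀ (cs : List Char) (i : Nat) (p : Nat × List Char), p ∈ bTokenize i cs →
    p.2 ≠ [] ∧ ∀ c ∈ p.2, PySem.Chars.isspace c = false := by
  intro cs i
  fun_induction bTokenize i cs with
  | case1 => simp
  | case2 i c rest hc ih => exact ih
  | case3 i c rest hc tok ih =>
    intro p hp
    rcases List.mem_cons.mp hp with h | h
    · subst h
      refine ⟨by simp [tok], ?_⟩
      intro x hx
      rcases List.mem_cons.mp hx with h | h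
      · subst h; simpa using hc
      · have := List.mem_takeWhile_imp h; simpa using this
    · exact ih p h

-- the main invariant: from a nonempty result with last_was_space = False, on a suffix that
-- starts with whitespace (or is empty), A's loop appends restChars/bSepIdx plus the trail
lemma L2 : ∀ (n : Nat) (cs : List Char), cs.length ≤ n →
    ∀ (i : Nat) (rc : List Char) (im : List Int), rc ≠ [] →
      (∀ c, cs.head? = some c → PySem.Chars.isspace c = true) →
      aLoop i cs rc im false =
        (rc ++ restChars (bTokenize i cs) ++ (trailPair i cs (bTokenize i cs)).1,
         im ++ bSepIdx i (bTokenize i cs) ++ (trailPair i cs (bTokenize i cs)).2) := by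
  intro n
  induction n with
  | zero =>
    intro cs hlen i rc im hrc hhd
    have hcs : cs = [] := List.eq_nil_of_length_eq_zero (Nat.le_zero.mp hlen)
    subst hcs
    simp [aLoop, bTokenize, restChars, bSepIdx, trailPair]
  | succ n ih =>
    intro cs hlen i rc im hrc hhd
    rcases cs with _ | ⟨w, cs'⟩
    · simp [aLoop, bTokenize, restChars, bSepIdx, trailPair]
    · have hw : PySem.Chars.isspace w = true := hhd w rfl
      have hstep : aLoop i (w :: cs') rc im false
          = aLoop (i + 1) cs' (rc ++ [' ']) (im ++ [(i : Int)]) true := by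
        rw [aLoop]
        simp [hw, List.isEmpty_iff, hrc]
      have hsplit : cs' = cs'.takeWhile PySem.Chars.isspace ++ cs'.dropWhile PySem.Chars.isspace :=
        List.takeWhile_append_dropWhile.symm
      set ws := cs'.takeWhile PySem.Chars.isspace with hws_def
      set rest := cs'.dropWhile PySem.Chars.isspace with hrest_def
      have hws : ∀ c ∈ ws, PySem.Chars.isspace c = true := fun c hc => List.mem_takeWhile_imp hc
      have hall : ∀ c ∈ w :: ws, PySem.Chars.isspace c = true := by
        intro c hc; rcases List.mem_cons.mp hc with h | h
        · subst h; exact hw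
        · exact hws c h
      have htokskip : bTokenize i (w :: cs') = bTokenize (i + 1 + ws.length) rest := by
        have h1 : w :: cs' = (w :: ws) ++ rest := by rw [hsplit]; simp
        rw [h1, tokSkip (w :: ws) hall rest i]
        congr 1
        simp [List.length_cons]; omega
      have hrw : aLoop i (w :: cs') rc im false
          = aLoop (i + 1 + ws.length) rest (rc ++ [' ']) (im ++ [(i : Int)]) true := by
        rw [hstep]
        conv_lhs => rw [hsplit]
        exact skipTrue ws hws rest (i + 1) _ _
      rcases hr : rest with _ | ⟨d, rest'⟩
      · -- w :: cs' is all whitespace: the loop ends on (rc ++ [' '], im ++ [i])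
        rw [hrw, hr, htokskip, hr]
        obtain ⟨c, hc1⟩ : ∃ c, (w :: cs').getLast? = some c := by
          rcases h : (w :: cs').getLast? with _ | c
          · simp at h
          · exact ⟨c, rfl⟩
        have hc2 : PySem.Chars.isspace c = true := by
          have hmem := List.mem_of_getLast? hc1
          have heq : (w :: cs') = (w :: ws) ++ [] := by rw [hsplit, hr]; simp
          rw [heq] at hmem
          exact hall _ (by simpa using hmem)
        simp [aLoop, bTokenize, restChars, bSepIdx, trailPair, hc1, hc2, lastEnd]
      · -- a token follows the whitespace run
        have hd : PySem.Chars.isspace d = false := by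
          have := List.head?_dropWhile_not PySem.Chars.isspace cs'
          rw [← hrest_def, hr] at this
          simpa using this
        set j := i + 1 + ws.length with hj_def
        set tok := d :: rest'.takeWhile (fun x => !PySem.Chars.isspace x) with htok_def
        set cs3 := rest'.dropWhile (fun x => !PySem.Chars.isspace x) with hcs3_def
        have htok_ne : tok ≠ [] := by simp [htok_def]
        have htok_sp : ∀ c ∈ tok, PySem.Chars.isspace c = false := by
          intro c hc
          rcases List.mem_cons.mp hc with h | h
          · subst h; exact hd
          · have := List.mem_takeWhile_imp h; simpa using this
        have hcs3_hd : ∀ c, cs3.head? = some c → PySem.Chars.isspace c = true := by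
          intro c hc
          have := List.head?_dropWhile_not (fun x => !PySem.Chars.isspace x) rest'
          rw [← hcs3_def, hc] at this
          simpa using this
        have hrest2 : d :: rest' = tok ++ cs3 := by
          rw [htok_def, hcs3_def]
          simp [List.takeWhile_append_dropWhile]
        have hrun : aLoop j (d :: rest') (rc ++ [' ']) (im ++ [(i : Int)]) true
            = aLoop (j + tok.length) cs3 (rc ++ [' '] ++ tok)
                (im ++ [(i : Int)] ++ PySem.List.pyRange (j : Int) ((j : Int) + tok.length) 1) false := by
          rw [hrest2]
          exact runLemma tok htok_ne htok_sp cs3 j _ _ true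
        have htokrun : bTokenize j (d :: rest') = (j, tok) :: bTokenize (j + tok.length) cs3 := by
          rw [hrest2]
          exact tokRun tok htok_ne htok_sp cs3 hcs3_hd j
        have hlen3 : cs3.length ≤ n := by
          have h1 : cs3.length ≤ rest'.length := List.length_dropWhile_le _ _
          have h2 : rest.length ≤ cs'.length := by
            rw [hrest_def]; exact List.length_dropWhile_le _ _
          rw [hr] at h2
          simp only [List.length_cons] at hlen h2
          omega
        have hih := ih cs3 hlen3 (j + tok.length) (rc ++ [' '] ++ tok)
          (im ++ [(i : Int)] ++ PySem.List.pyRange (j : Int) ((j : Int) + tok.length) 1)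
          (by simp [htok_def]) hcs3_hd
        rw [hrw, hr, hrun, hih, htokskip, hr, htokrun]
        -- assemble both components
        have htrail : trailPair i (w :: cs') ((j, tok) :: bTokenize (j + tok.length) cs3)
            = trailPair (j + tok.length) cs3 (bTokenize (j + tok.length) cs3) := by
          have hlast_pref : w :: cs' = ((w :: ws) ++ tok) ++ cs3 := by
            rw [hsplit, hr, hrest2]; simp
          rcases hc3 : cs3 with _ | ⟨e, cs3'⟩
          · have : (w :: cs').getLast? = some (tok.getLast htok_ne) := by
              rw [hlast_pref, hc3, List.append_nil,
                List.getLast?_append_of_ne_nil (w :: ws) htok_ne,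
                List.getLast?_eq_some_getLast htok_ne]
            rw [trailPair, this, trailPair]
            simp [htok_sp _ (List.getLast_mem htok_ne)]
          · have hgl : (w :: cs').getLast? = cs3.getLast? := by
              rw [hlast_pref, List.getLast?_append_of_ne_nil _ (by rw [hc3]; simp)]
            rw [trailPair, trailPair, hgl, ← hc3]
            rcases h3 : cs3.getLast? with _ | c
            · rfl
            · simp only [lastEnd]
          -- lastEnd i ((j,tok)::ts) = lastEnd (j+tok.length) ts holds by definition
        rw [htrail]
        simp [restChars, bSepIdx]

lemma joinRest : ∀ (ts : List (Nat × List Char)) (t0 : List Char),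
    PySem.Chars.join [' '] (t0 :: ts.map Prod.snd) = t0 ++ restChars ts := by
  intro ts
  induction ts with
  | nil => intro t0; simp [restChars, PySem.Chars.join_singleton]
  | cons q ts ih =>
    intro t0
    obtain ⟨st, t⟩ := q
    simp only [List.map_cons, PySem.Chars.join_cons_cons, restChars, ih t]
    simp

lemma restChars_getLast (ts : List (Nat × List Char))
    (h : ∀ p ∈ ts, p.2 ≠ [] ∧ ∀ c ∈ p.2, PySem.Chars.isspace c = false) (hne : ts ≠ []) :
    ∃ c, (restChars ts).getLast? = some c ∧ PySem.Chars.isspace c = false := by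
  induction ts with
  | nil => exact absurd rfl hne
  | cons q ts ih =>
    obtain ⟨st, t⟩ := q
    obtain ⟨ht, hsp⟩ := h (st, t) (by simp)
    rcases ts with _ | ⟨r, ts⟩
    · refine ⟨t.getLast ht, ?_, hsp _ (List.getLast_mem ht)⟩
      show ((' ' :: t) ++ restChars []).getLast? = _
      rw [restChars, List.append_nil]
      show ([' '] ++ t).getLast? = _
      rw [List.getLast?_append_of_ne_nil [' '] ht, List.getLast?_eq_some_getLast ht]
    · obtain ⟨c, hc, hcs⟩ := ih (fun p hp => h p (by simp [hp])) (by simp)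
      refine ⟨c, ?_, hcs⟩
      show ((' ' :: t) ++ restChars ((r :: ts))).getLast? = _
      rw [List.getLast?_append_of_ne_nil _ (by rcases r with ⟨a,b⟩; simp [restChars])]
      exact hc

lemma noTrailLast (tok0 : List Char) (ts' : List (Nat × List Char)) (htok_ne : tok0 ≠ [])
    (htok_sp : ∀ c ∈ tok0, PySem.Chars.isspace c = false)
    (hwf : ∀ p ∈ ts', p.2 ≠ [] ∧ ∀ c ∈ p.2, PySem.Chars.isspace c = false) :
    (tok0 ++ restChars ts').getLast? ≠ some ' ' := by
  have hsp : PySem.Chars.isspace ' ' = true := by decide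
  rcases hts' : ts' with _ | ⟨q, ts''⟩
  · simp only [restChars, List.append_nil]
    rw [List.getLast?_eq_some_getLast htok_ne]
    intro h
    have hx := htok_sp _ (List.getLast_mem htok_ne)
    rw [Option.some_inj.mp h, hsp] at hx
    exact Bool.true_eq_false.mp hx
  · obtain ⟨c, hc1, hc2⟩ := restChars_getLast (q :: ts'') (by rw [← hts']; exact hwf) (by simp)
    rw [List.getLast?_append_of_ne_nil tok0 (by rcases q with ⟨a, b⟩; simp [restChars]), hc1]
    intro h
    rw [Option.some_inj.mp h, hsp] at hc2
    exact Bool.true_eq_false.mp hc2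

-- everything assembled on the character-list level
lemma key (cs : List Char) :
    (let p := aLoop 0 cs [] [] false
     if p.1.getLast? = some ' ' then (p.1.dropLast, p.2.dropLast) else p) =
    (PySem.Chars.join [' '] ((bTokenize 0 cs).map Prod.snd), bIndexMap (bTokenize 0 cs)) := by
  have hsplit : cs = cs.takeWhile PySem.Chars.isspace ++ cs.dropWhile PySem.Chars.isspace :=
    List.takeWhile_append_dropWhile.symm
  set ws0 := cs.takeWhile PySem.Chars.isspace with hws_def
  set rest0 := cs.dropWhile PySem.Chars.isspace with hrest_def
  have hwsp : ∀ c ∈ ws0, PySem.Chars.isspace c = true := fun c hc => List.mem_takeWhile_imp hc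
  have hskip : aLoop 0 cs [] [] false = aLoop (0 + ws0.length) rest0 [] [] false := by
    conv_lhs => rw [hsplit]
    exact skipEmpty ws0 hwsp rest0 0 false
  have htokskip : bTokenize 0 cs = bTokenize (0 + ws0.length) rest0 := by
    conv_lhs => rw [hsplit]
    exact tokSkip ws0 hwsp rest0 0
  rcases hr : rest0 with _ | ⟨d, rest'⟩
  · rw [hskip, hr, htokskip, hr]
    simp [aLoop, bTokenize, bIndexMap, PySem.Chars.join, List.intercalate]
  · have hd : PySem.Chars.isspace d = false := by
      have := List.head?_dropWhile_not PySem.Chars.isspace cs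
      rw [← hrest_def, hr] at this
      simpa using this
    set j := 0 + ws0.length with hj_def
    set tok0 := d :: rest'.takeWhile (fun x => !PySem.Chars.isspace x) with htok_def
    set cs4 := rest'.dropWhile (fun x => !PySem.Chars.isspace x) with hcs4_def
    have htok_ne : tok0 ≠ [] := by simp [htok_def]
    have htok_sp : ∀ c ∈ tok0, PySem.Chars.isspace c = false := by
      intro c hc
      rcases List.mem_cons.mp hc with h | h
      · subst h; exact hd
      · have := List.mem_takeWhile_imp h; simpa using this
    have hcs4_hd : ∀ c, cs4.head? = some c → PySem.Chars.isspace c = true := by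
      intro c hc
      have := List.head?_dropWhile_not (fun x => !PySem.Chars.isspace x) rest'
      rw [← hcs4_def, hc] at this
      simpa using this
    have hrest2 : d :: rest' = tok0 ++ cs4 := by
      rw [htok_def, hcs4_def]
      simp [List.takeWhile_append_dropWhile]
    have hrun : aLoop j (d :: rest') [] [] false
        = aLoop (j + tok0.length) cs4 tok0 (PySem.List.pyRange (j : Int) ((j : Int) + tok0.length) 1) false := by
      rw [hrest2]
      have := runLemma tok0 htok_ne htok_sp cs4 j [] [] false
      simpa using this
    have htokrun : bTokenize j (d :: rest') = (j, tok0) :: bTokenize (j + tok0.length) cs4 := by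
      rw [hrest2]
      exact tokRun tok0 htok_ne htok_sp cs4 hcs4_hd j
    set ts' := bTokenize (j + tok0.length) cs4 with hts_def
    have hL2 := L2 cs4.length cs4 le_rfl (j + tok0.length) tok0
      (PySem.List.pyRange (j : Int) ((j : Int) + tok0.length) 1) htok_ne hcs4_hd
    have hA : aLoop 0 cs [] [] false =
        (tok0 ++ restChars ts' ++ (trailPair (j + tok0.length) cs4 ts').1,
         PySem.List.pyRange (j : Int) ((j : Int) + tok0.length) 1 ++ bSepIdx (j + tok0.length) ts'
           ++ (trailPair (j + tok0.length) cs4 ts').2) := by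
      rw [hskip, hr, hrun, hL2]
    have hts : bTokenize 0 cs = (j, tok0) :: ts' := by rw [htokskip, hr, htokrun]
    have hwf : ∀ p ∈ ts', p.2 ≠ [] ∧ ∀ c ∈ p.2, PySem.Chars.isspace c = false :=
      fun p hp => bTokenize_wf cs4 (j + tok0.length) p hp
    have hjoin : PySem.Chars.join [' '] ((bTokenize 0 cs).map Prod.snd) = tok0 ++ restChars ts' := by
      rw [hts, List.map_cons]
      exact joinRest ts' tok0
    have hbim : bIndexMap (bTokenize 0 cs)
        = PySem.List.pyRange (j : Int) ((j : Int) + tok0.length) 1 ++ bSepIdx (j + tok0.length) ts' := by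
      rw [hts, bIndexMap]
    -- the pop: with a trailing space A drops exactly the trail, otherwise the last char is not ' '
    rw [hA]
    rcases hgl : cs4.getLast? with _ | c
    · have htp : trailPair (j + tok0.length) cs4 ts' = ([], []) := by
        simp [trailPair, hgl]
      rw [htp]
      have hne : (tok0 ++ restChars ts' ++ (([], []) : List Char × List Int).1).getLast? ≠ some ' ' := by
        simp only [List.append_nil]
        exact noTrailLast tok0 ts' htok_ne htok_sp hwf
      rw [if_neg hne]
      simp [hjoin, hbim]
    · by_cases hcsp : PySem.Chars.isspace c = true
      · have htp : trailPair (j + tok0.length) cs4 ts'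
            = ([' '], [(lastEnd (j + tok0.length) ts' : Int)]) := by
          simp [trailPair, hgl, hcsp]
        rw [htp]
        have h1 : tok0 ++ restChars ts' ++ (([' '], [(lastEnd (j + tok0.length) ts' : Int)]) :
            List Char × List Int).1 = (tok0 ++ restChars ts') ++ [' '] := by simp
        have hlast : ((tok0 ++ restChars ts') ++ [' ']).getLast? = some ' ' := by
          rw [List.getLast?_append_of_ne_nil _ (by simp)]; rfl
        rw [h1, if_pos hlast]
        refine Prod.ext ?_ ?_
        · simp [hjoin]
        · show (PySem.List.pyRange (j : Int) ((j : Int) + tok0.length) 1 ++ bSepIdx (j + tok0.length) ts'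
              ++ [(lastEnd (j + tok0.length) ts' : Int)]).dropLast = _
          rw [List.dropLast_concat, hbim]
      · have htp : trailPair (j + tok0.length) cs4 ts' = ([], []) := by
          simp [trailPair, hgl, hcsp]
        rw [htp]
        have hne : (tok0 ++ restChars ts' ++ (([], []) : List Char × List Int).1).getLast? ≠ some ' ' := by
          simp only [List.append_nil]
          exact noTrailLast tok0 ts' htok_ne htok_sp hwf
        rw [if_neg hne]
        simp [hjoin, hbim]

-- ===== VERDICT (by name: the statement is the Claim_ definition above) =====
theorem normalize_text_with_mapping_spec : Claim_equal_normalize_text_with_mapping := by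
  intro s _
  unfold Spec_normalize_text_with_mapping normalize_text_with_mapping normalize_text_with_mapping_alt
  have h := key (PySem.Chars.replace s.toList ['\r'] ['\n'])
  simp only [Prod.mk.eta] at h ⊢
  rw [h]
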